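-- pv_equiv track=rewrite | github.com/vishrutkmr7/DailyPracticeProblemsDIP | 2022/09 September/db09302022.py | longestUniquePhrase
-- ===== SOURCE A (Python) =====
-- def longestUniquePhrase(words: list[str]) -> int:
--     dp = [set()]
--     for word in words:
--         if len(set(word)) < len(word):
--             continue
--         word = set(word)
--         dp.extend(word | entry for entry in dp[:] if not word & entry)
--     return max(len(word) for word in dp)
-- ===== SOURCE B (Python) =====
-- def longestUniquePhrase(words: list[str]) -> int:
--     # Recursive backtracking over word indices instead of A's breadth-first dp list of sets.
--     def helper(i, used, total):
--         if i == len(words):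
--             return total
--         best = helper(i + 1, used, total)
--         w = words[i]
--         cs = set(w)
--         if len(cs) == len(w) and cs.isdisjoint(used):
--             best = max(best, helper(i + 1, used | cs, total + len(w)))
--         return best
--     return helper(0, set(), 0)
-- ===== Notes on version B (the rewrite author's own statement) =====
-- stated objective: alternative
-- what changed: Replaces A's breadth-first dp list that materialises every achievable character set with depth-first recursive backtracking over word indices that carries only the current used-char set and running length, taking the max of the skip/include branches.
import Mathlib
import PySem

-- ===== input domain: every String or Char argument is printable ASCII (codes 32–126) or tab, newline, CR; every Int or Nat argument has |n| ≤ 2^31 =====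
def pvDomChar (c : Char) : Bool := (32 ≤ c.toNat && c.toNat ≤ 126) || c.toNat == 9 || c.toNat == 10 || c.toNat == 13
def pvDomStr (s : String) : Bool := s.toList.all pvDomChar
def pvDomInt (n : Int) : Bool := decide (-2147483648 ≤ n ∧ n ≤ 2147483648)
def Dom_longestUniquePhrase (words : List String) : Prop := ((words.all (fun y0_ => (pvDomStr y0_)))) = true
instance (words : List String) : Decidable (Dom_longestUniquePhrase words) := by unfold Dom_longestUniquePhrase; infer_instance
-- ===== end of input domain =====

-- B replaces A's breadth-first dp list of all achievable char sets with depth-first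
-- recursive backtracking carrying one used-set and a running length (objective: alternative).

-- ===== PORT A =====
-- one `for word in words` iteration of A's loop (continue / set(word) / dp.extend)
def aStep (dp : List (PySem.Set Char)) (word : String) : List (PySem.Set Char) :=
  if (PySem.Set.ofList word.toList).length < word.toList.length then dp
  else
    let w : PySem.Set Char := PySem.Set.ofList word.toList
    dp ++ ((dp.filter (fun entry => (PySem.Set.inter w entry).isEmpty)).map
      (fun entry => PySem.Set.union w entry))

def longestUniquePhrase (words : List String) : Int :=
  -- dp contains the initial empty set, so Python's max never raises; `none` is unreachable
  match PySem.List.max? ((words.foldl aStep [PySem.Set.empty]).map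
      (fun w => (w.length : Int))) (fun x => x) with
  | some m => m
  | none => 0

-- ===== PORT B =====
-- helper(i, used, total) of Source B, recursing on the remaining suffix of words
def bGo (words : List String) (used : PySem.Set Char) (total : Int) : Int :=
  match words with
  | [] => total
  | w :: rest =>
    let best := bGo rest used total
    let cs : PySem.Set Char := PySem.Set.ofList w.toList
    if cs.length == w.toList.length && PySem.Set.isdisjoint cs used then
      max best (bGo rest (PySem.Set.union used cs) (total + (w.toList.length : Int)))
    else best

def longestUniquePhrase_alt (words : List String) : Int :=
  bGo words PySem.Set.empty 0

-- ===== PRECONDITION & SPEC =====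
def Spec_longestUniquePhrase (words : List String) (out : Int) : Prop := out = longestUniquePhrase_alt words
instance (words : List String) (out : Int) : Decidable (Spec_longestUniquePhrase words out) := by unfold Spec_longestUniquePhrase; infer_instance

-- ===== CLAIM (what is proved, stated in full; the proofs are below) =====
def Claim_equal_longestUniquePhrase : Prop := ∀ (words : List String), Dom_longestUniquePhrase words → Spec_longestUniquePhrase words (longestUniquePhrase words)

-- ===== LEMMAS AND PROOFS =====

-- max of an Int list as an Option (none on []), an algebraic handle on Python's max
def omax : Option Int → Option Int → Option Int
  | none, b => b
  | some a, none => some a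
  | some a, some b => some (max a b)

def nmax : List Int → Option Int
  | [] => none
  | x :: t => omax (some x) (nmax t)

theorem omax_assoc (a b c : Option Int) : omax (omax a b) c = omax a (omax b c) := by
  cases a <;> cases b <;> cases c <;> simp [omax, max_assoc]

theorem omax_comm (a b : Option Int) : omax a b = omax b a := by
  cases a <;> cases b <;> simp [omax, max_comm]

theorem omax_left_comm (a b c : Option Int) : omax a (omax b c) = omax b (omax a c) := by
  rw [← omax_assoc, omax_comm a b, omax_assoc]

theorem nmax_append (xs ys : List Int) : nmax (xs ++ ys) = omax (nmax xs) (nmax ys) := by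
  induction xs with
  | nil => rfl
  | cons x t ih => simp only [List.cons_append, nmax, ih, omax_assoc]

theorem foldl_max_init (t : List Int) : ∀ a b, t.foldl max (max a b) = max a (t.foldl max b) := by
  induction t with
  | nil => intro a b; rfl
  | cons c t ih =>
    intro a b
    simp only [List.foldl_cons, max_assoc, ih]

theorem nmax_cons_foldl (t : List Int) : ∀ x, nmax (x :: t) = some (t.foldl max x) := by
  induction t with
  | nil => intro x; rfl
  | cons y t ih =>
    intro x
    show omax (some x) (nmax (y :: t)) = _
    rw [ih y]
    simp only [omax, List.foldl_cons]
    rw [← foldl_max_init]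

theorem nmax_split {α : Type} (d : α → Bool) (f h : α → Int) (l : List α) :
    nmax (l.map (fun e => if d e then max (f e) (h e) else f e)) =
      omax (nmax (l.map f)) (nmax ((l.filter d).map h)) := by
  induction l with
  | nil => rfl
  | cons e l ih =>
    by_cases hd : d e
    · simp only [List.map_cons, List.filter_cons, hd, if_pos, nmax, ih]
      show omax (some (max (f e) (h e))) _ = _
      have h1 : (some (max (f e) (h e))) = omax (some (f e)) (some (h e)) := rfl
      rw [h1, omax_assoc, omax_left_comm (some (h e)), ← omax_assoc]
    · simp only [List.map_cons, List.filter_cons, hd, if_neg, Bool.false_eq_true, not_false_iff,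
        nmax, ih, omax_assoc]

-- bGo only looks at `used` through membership
theorem bGo_congr : ∀ (ws : List String) (u1 u2 : PySem.Set Char) (t : Int),
    (∀ x, x ∈ u1 ↔ x ∈ u2) → bGo ws u1 t = bGo ws u2 t := by
  intro ws
  induction ws with
  | nil => intro u1 u2 t _; rfl
  | cons w rest ih =>
    intro u1 u2 t hmem
    have hdis : PySem.Set.isdisjoint (PySem.Set.ofList w.toList) u1 =
        PySem.Set.isdisjoint (PySem.Set.ofList w.toList) u2 := by
      by_cases hb : PySem.Set.isdisjoint (PySem.Set.ofList w.toList) u1 = true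
      · rw [hb]; symm
        rw [PySem.Set.isdisjoint_iff] at hb ⊢
        intro x hx hx2
        exact hb x hx ((hmem x).mpr hx2)
      · rw [Bool.not_eq_true] at hb
        rw [hb]; symm
        rw [Bool.eq_false_iff] at hb ⊢
        intro hc
        apply hb
        rw [PySem.Set.isdisjoint_iff] at hc ⊢
        intro x hx hx1
        exact hc x hx ((hmem x).mp hx1)
    simp only [bGo, hdis]
    have hu : ∀ x, x ∈ PySem.Set.union u1 (PySem.Set.ofList w.toList) ↔
        x ∈ PySem.Set.union u2 (PySem.Set.ofList w.toList) := by
      intro x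
      simp only [PySem.Set.mem_union, hmem]
    rw [ih u1 u2 t hmem, ih _ _ _ hu]

theorem inter_isEmpty_eq_isdisjoint (s t : PySem.Set Char) :
    (PySem.Set.inter s t).isEmpty = PySem.Set.isdisjoint s t := by
  by_cases hb : PySem.Set.isdisjoint s t = true
  · rw [hb, List.isEmpty_iff, List.eq_nil_iff_forall_not_mem]
    rw [PySem.Set.isdisjoint_iff] at hb
    intro x hx
    rw [PySem.Set.mem_inter] at hx
    exact hb x hx.1 hx.2
  · rw [Bool.not_eq_true] at hb
    rw [hb, List.isEmpty_eq_false_iff]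
    intro hnil
    rw [Bool.eq_false_iff] at hb
    apply hb
    rw [PySem.Set.isdisjoint_iff]
    intro x hx hx2
    have : x ∈ PySem.Set.inter s t := by rw [PySem.Set.mem_inter]; exact ⟨hx, hx2⟩
    rw [hnil] at this
    exact absurd this (List.not_mem_nil)

theorem aStep_ne_nil (dp : List (PySem.Set Char)) (w : String) (h : dp ≠ []) :
    aStep dp w ≠ [] := by
  unfold aStep
  split
  · exact h
  · simp only [ne_eq, List.append_eq_nil_iff]
    intro hc
    exact h hc.1

theorem foldl_aStep_ne_nil (ws : List String) : ∀ dp, dp ≠ [] →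
    List.foldl aStep dp ws ≠ [] := by
  induction ws with
  | nil => intro dp h; exact h
  | cons w rest ih => intro dp h; exact ih _ (aStep_ne_nil dp w h)

-- the heart: A's dp fold computes, for each entry, exactly B's backtracking value
theorem main_lemma (ws : List String) : ∀ dp : List (PySem.Set Char),
    (∀ e ∈ dp, List.Nodup e) →
    nmax ((List.foldl aStep dp ws).map (fun e => ((e.length : Int)))) =
      nmax (dp.map (fun e => bGo ws e (e.length : Int))) := by
  induction ws with
  | nil =>
    intro dp _
    simp only [List.foldl_nil, bGo]
  | cons w rest ih =>
    intro dp hnd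
    rw [List.foldl_cons]
    by_cases hlt : (PySem.Set.ofList w.toList).length < w.toList.length
    · -- word has a repeated char: A continues, B's condition is false
      have hstep : aStep dp w = dp := by unfold aStep; rw [if_pos hlt]
      rw [hstep, ih dp hnd]
      apply congrArg
      apply List.map_congr_left
      intro e _
      have hfalse : ((PySem.Set.ofList w.toList).length == w.toList.length) = false := by
        rw [beq_eq_false_iff_ne]
        exact Nat.ne_of_lt hlt
      simp only [bGo, hfalse, Bool.false_and, Bool.false_eq_true, if_false]
    · -- word has all distinct chars
      have hlen : (PySem.Set.ofList w.toList).length = w.toList.length :=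
        Nat.le_antisymm (PySem.Set.length_ofList_le _) (Nat.le_of_not_lt hlt)
      have hbeq : ((PySem.Set.ofList w.toList).length == w.toList.length) = true := by
        rw [Nat.beq_eq_true_eq]; exact hlen
      set cs : PySem.Set Char := PySem.Set.ofList w.toList with hcs
      have hstep : aStep dp w = dp ++
          ((dp.filter (fun entry => PySem.Set.isdisjoint cs entry)).map
            (fun entry => PySem.Set.union cs entry)) := by
        have hfn : (fun entry => (PySem.Set.inter cs entry).isEmpty) =
            (fun entry => PySem.Set.isdisjoint cs entry) :=
          funext (fun e => inter_isEmpty_eq_isdisjoint _ _)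
        unfold aStep
        rw [if_neg hlt]
        show dp ++ ((dp.filter (fun entry => (PySem.Set.inter cs entry).isEmpty)).map
            (fun entry => PySem.Set.union cs entry)) = _
        rw [hfn]
      rw [hstep]
      have hnd2 : ∀ e ∈ dp ++
          ((dp.filter (fun entry => PySem.Set.isdisjoint cs entry)).map
            (fun entry => PySem.Set.union cs entry)), List.Nodup e := by
        intro e he
        rw [List.mem_append] at he
        rcases he with he | he
        · exact hnd e he
        · rw [List.mem_map] at he
          obtain ⟨x, _, rfl⟩ := he
          exact PySem.Set.nodup_union _ _ (PySem.Set.nodup_ofList _)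
      rw [ih _ hnd2, List.map_append, nmax_append]
      -- rewrite the appended part into the `include` branch values
      have hext : ((dp.filter (fun entry => PySem.Set.isdisjoint cs entry)).map
            (fun entry => PySem.Set.union cs entry)).map
              (fun e => bGo rest e (e.length : Int)) =
          (dp.filter (fun entry => PySem.Set.isdisjoint cs entry)).map
            (fun e => bGo rest (PySem.Set.union e cs) ((e.length : Int) + (w.toList.length : Int))) := by
        rw [List.map_map]
        apply List.map_congr_left
        intro e hef
        rw [List.mem_filter] at hef
        obtain ⟨hedp, hdis⟩ := hef
        have hend : List.Nodup e := hnd e hedp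
        have hdis' : ∀ x ∈ e, x ∉ cs := by
          rw [PySem.Set.isdisjoint_iff] at hdis
          intro x hx hc
          exact hdis x hc hx
        have hulen : (PySem.Set.union cs e).length = cs.length + e.length := by
          have : PySem.Set.union cs e = cs ++ e :=
            PySem.Set.update_eq_append_of_disjoint cs e hend hdis'
          rw [this, List.length_append]
        simp only [Function.comp_apply]
        rw [hulen]
        have hc : bGo rest (PySem.Set.union cs e) ((cs.length + e.length : Nat) : Int) =
            bGo rest (PySem.Set.union e cs) ((cs.length + e.length : Nat) : Int) := by
          apply bGo_congr
          intro x
          simp only [PySem.Set.mem_union]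
          exact Or.comm
        rw [hc]
        apply congrArg
        push_cast
        rw [hlen]
        ring
      rw [hext]
      -- rewrite B's side into the if-form and split
      have hB : dp.map (fun e => bGo (w :: rest) e (e.length : Int)) =
          dp.map (fun e => if PySem.Set.isdisjoint cs e then
              max (bGo rest e (e.length : Int))
                (bGo rest (PySem.Set.union e cs) ((e.length : Int) + (w.toList.length : Int)))
            else bGo rest e (e.length : Int)) := by
        apply List.map_congr_left
        intro e _
        simp only [bGo, ← hcs, hbeq, Bool.true_and]
      rw [hB, nmax_split]

-- ===== VERDICT (by name: the statement is the Claim_ definition above) =====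
theorem longestUniquePhrase_spec : Claim_equal_longestUniquePhrase := by
  intro words _
  unfold Spec_longestUniquePhrase longestUniquePhrase longestUniquePhrase_alt
  have hnd : ∀ e ∈ ([PySem.Set.empty] : List (PySem.Set Char)), List.Nodup e := by
    intro e he
    simp only [List.mem_singleton] at he
    subst he
    exact List.nodup_nil
  have hmain := main_lemma words [PySem.Set.empty] hnd
  have hrhs : nmax (([PySem.Set.empty] : List (PySem.Set Char)).map
      (fun e => bGo words e (e.length : Int))) = some (bGo words PySem.Set.empty 0) := rfl
  rw [hrhs] at hmain
  have hne := foldl_aStep_ne_nil words [PySem.Set.empty] (by simp)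
  obtain ⟨x, t, hxt⟩ := List.exists_cons_of_ne_nil hne
  rw [hxt] at hmain ⊢
  rw [List.map_cons] at hmain ⊢
  rw [nmax_cons_foldl] at hmain
  rw [PySem.List.max?_id_cons]
  simp only [Option.some.injEq] at hmain
  simp only [hmain]
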